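-- pv_equiv track=rewrite | github.com/GarethManning/curriculum-harness | curriculum_harness/phases/phase1_ingestion.py | _window_history_grade7
-- ===== SOURCE A (Python) =====
-- _MAX_INPUT_FOR_SCOPE = 320_000
--
-- def _window_history_grade7(full_text: str, max_chars: int = _MAX_INPUT_FOR_SCOPE) -> str:
--     """Anchor on History / Grade 7 headings common in Ontario SSHG PDFs."""
--     lower = full_text.lower()
--     needles = [
--         "grades 7 and 8 history",
--         "history, grade",
--         "the ontario curriculum grades 7 and 8 history",
--         "grade 7 history",
--         "strands: history",
--     ]
--     positions = [lower.find(n) for n in needles]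
--     positions = [p for p in positions if p >= 0]
--     if not positions:
--         h = lower.find("history")
--         positions = [h] if h >= 0 else [0]
--     start = max(0, min(positions) - 12000)
--     end = min(len(full_text), start + max_chars)
--     return full_text[start:end]
-- ===== SOURCE B (Python) =====
-- _MAX_INPUT_FOR_SCOPE = 320_000
--
-- _NEEDLES = (
--     "grades 7 and 8 history",
--     "history, grade",
--     "the ontario curriculum grades 7 and 8 history",
--     "grade 7 history",
--     "strands: history",
-- )
--
--
-- def _first_startswith(lower, needles):
--     """Single left-to-right scan: first index where any needle starts, else -1."""
--     for i in range(len(lower)):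
--         for n in needles:
--             if lower.startswith(n, i):
--                 return i
--     return -1
--
--
-- def _window_history_grade7(full_text: str, max_chars: int = _MAX_INPUT_FOR_SCOPE) -> str:
--     lower = full_text.lower()
--     anchor = _first_startswith(lower, _NEEDLES)
--     if anchor < 0:
--         anchor = _first_startswith(lower, ("history",))
--     if anchor < 0:
--         anchor = 0
--     start = max(0, anchor - 12000)
--     end = min(len(full_text), start + max_chars)
--     return full_text[start:end]
-- ===== Notes on version B (the rewrite author's own statement) =====
-- stated objective: alternative
-- what changed: Replaces the five separate whole-text find() scans plus min(positions) (and the separate fallback find) with one left-to-right scan that stops at the first index where any needle starts, so the anchor is found in a single pass.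
import Mathlib
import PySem

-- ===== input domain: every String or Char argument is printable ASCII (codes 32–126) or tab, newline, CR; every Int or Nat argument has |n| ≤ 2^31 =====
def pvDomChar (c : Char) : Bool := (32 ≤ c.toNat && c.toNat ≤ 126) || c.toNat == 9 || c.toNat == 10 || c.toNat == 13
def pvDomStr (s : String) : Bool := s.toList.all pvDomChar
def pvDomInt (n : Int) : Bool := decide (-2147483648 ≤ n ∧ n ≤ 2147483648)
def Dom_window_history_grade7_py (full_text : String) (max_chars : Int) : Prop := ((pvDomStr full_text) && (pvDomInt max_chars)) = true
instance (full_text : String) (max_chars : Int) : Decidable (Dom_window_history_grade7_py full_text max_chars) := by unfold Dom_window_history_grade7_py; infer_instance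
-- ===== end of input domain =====

-- B replaces A's five whole-text find() scans plus min(positions) (and the separate fallback
-- find) with a single left-to-right scan stopping at the first index where any needle starts
-- (objective: alternative — a different algorithm of the same cost).

def pvNeedles : List (List Char) :=
  [ "grades 7 and 8 history".toList
  , "history, grade".toList
  , "the ontario curriculum grades 7 and 8 history".toList
  , "grade 7 history".toList
  , "strands: history".toList ]

-- ===== PORT A =====
def window_history_grade7_py (full_text : String) (max_chars : Int) : String :=
  let lower := PySem.Chars.lower full_text.toList
  let positions := pvNeedles.map (fun n => PySem.Chars.find lower n)
  let positions := positions.filter (fun p => 0 ≤ p)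
  let positions :=
    if positions = [] then
      let h := PySem.Chars.find lower "history".toList
      if 0 ≤ h then [h] else [(0 : Int)]
    else positions
  let start := max 0 ((PySem.List.min? positions (fun p => p)).getD 0 - 12000)
  let stop := min (PySem.Str.len full_text) (start + max_chars)
  PySem.Str.slice full_text (some start) (some stop)

-- ===== PORT B =====
-- port of Source B's _first_startswith: one pass over the suffixes, i counts the current index
def pvFirstStartswith (needles : List (List Char)) : List Char → Int → Int
  | [], _ => -1
  | c :: rest, i =>
    if needles.any (fun n => n.isPrefixOf (c :: rest)) then i
    else pvFirstStartswith needles rest (i + 1)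

def window_history_grade7_py_alt (full_text : String) (max_chars : Int) : String :=
  let lower := PySem.Chars.lower full_text.toList
  let a0 := pvFirstStartswith pvNeedles lower 0
  let a1 := if a0 < 0 then pvFirstStartswith ["history".toList] lower 0 else a0
  let anchor := if a1 < 0 then 0 else a1
  let start := max 0 (anchor - 12000)
  let stop := min (PySem.Str.len full_text) (start + max_chars)
  PySem.Str.slice full_text (some start) (some stop)

-- ===== PRECONDITION & SPEC =====
def Spec_window_history_grade7_py (full_text : String) (max_chars : Int) (out : String) : Prop := out = window_history_grade7_py_alt full_text max_chars
instance (full_text : String) (max_chars : Int) (out : String) : Decidable (Spec_window_history_grade7_py full_text max_chars out) := by unfold Spec_window_history_grade7_py; infer_instance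

-- ===== CLAIM (what is proved, stated in full; the proofs are below) =====
def Claim_equal_window_history_grade7_py : Prop := ∀ (full_text : String) (max_chars : Int), Dom_window_history_grade7_py full_text max_chars → Spec_window_history_grade7_py full_text max_chars (window_history_grade7_py full_text max_chars)

-- ===== LEMMAS AND PROOFS =====

-- characterization of the scan: either no needle matches at any suffix (result -1),
-- or the result is i + j for the least j at which some needle matches
theorem pvFirstStartswith_spec (N : List (List Char)) (s : List Char) (i : Int)
    (hN : ∀ n ∈ N, n ≠ []) :
    (pvFirstStartswith N s i = -1 ∧ ∀ j : Nat, ¬ (N.any (fun n => n.isPrefixOf (s.drop j)) = true))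
    ∨ (∃ j : Nat, pvFirstStartswith N s i = i + j ∧ (N.any (fun n => n.isPrefixOf (s.drop j)) = true)
        ∧ ∀ k : Nat, k < j → ¬ (N.any (fun n => n.isPrefixOf (s.drop k)) = true)) := by
  induction s generalizing i with
  | nil =>
    left
    refine ⟨rfl, fun j => ?_⟩
    simp only [List.drop_nil, List.any_eq_true, not_exists]
    rintro n ⟨hn, hpre⟩
    exact hN n hn (List.prefix_nil.mp (List.isPrefixOf_iff_prefix.mp hpre))
  | cons c rest ih =>
    by_cases h : N.any (fun n => n.isPrefixOf (c :: rest)) = true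
    · right
      exact ⟨0, by simp [pvFirstStartswith, h], by simpa using h, by omega⟩
    · have hstep : pvFirstStartswith N (c :: rest) i = pvFirstStartswith N rest (i + 1) := by
        simp [pvFirstStartswith, h]
      rcases ih (i + 1) with ⟨h1, h2⟩ | ⟨j, hj1, hj2, hj3⟩
      · left
        refine ⟨by rw [hstep]; exact h1, fun j => ?_⟩
        cases j with
        | zero => simpa using h
        | succ j' => simpa using h2 j'
      · right
        refine ⟨j + 1, by rw [hstep, hj1]; push_cast; ring, by simpa using hj2, fun k hk => ?_⟩
        cases k with
        | zero => simpa using h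
        | succ k' => simpa using hj3 k' (by omega)

-- main bridge: the scan equals the min of the nonnegative find positions (or -1 if none)
theorem pvScan_eq_min (N : List (List Char)) (s : List Char) (hN : ∀ n ∈ N, n ≠ []) :
    (((N.map (fun n => PySem.Chars.find s n)).filter (fun p => 0 ≤ p)) = [] →
      pvFirstStartswith N s 0 = -1)
    ∧ (∀ m, PySem.List.min? ((N.map (fun n => PySem.Chars.find s n)).filter (fun p => 0 ≤ p)) (fun p => p) = some m →
      pvFirstStartswith N s 0 = m) := by
  constructor
  · intro hF
    rcases pvFirstStartswith_spec N s 0 hN with ⟨h1, _⟩ | ⟨j, _, hj2, _⟩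
    · exact h1
    · exfalso
      rw [List.any_eq_true] at hj2
      rcases hj2 with ⟨n, hn, hpre⟩
      have hinf : PySem.Chars.isIn n s = true :=
        (PySem.Chars.exists_prefix_drop_iff_isIn n s).mp ⟨j, List.isPrefixOf_iff_prefix.mp hpre⟩
      have hfind : 0 ≤ PySem.Chars.find s n := by
        rw [PySem.Chars.find_nonneg_iff]
        exact (PySem.Chars.isIn_iff_infix n s).mp hinf
      have : PySem.Chars.find s n ∈ (N.map (fun n => PySem.Chars.find s n)).filter (fun p => 0 ≤ p) := by
        rw [List.mem_filter]
        exact ⟨List.mem_map_of_mem hn, by simpa using hfind⟩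
      rw [hF] at this; exact absurd this (List.not_mem_nil)
  · intro m hm
    have hmem := PySem.List.min?_mem hm
    rw [List.mem_filter] at hmem
    rcases hmem with ⟨hmap, hm0⟩
    have hm0 : (0:Int) ≤ m := by simpa using hm0
    rw [List.mem_map] at hmap
    rcases hmap with ⟨n0, hn0, hfn0⟩
    have hspec0 := PySem.Chars.find_spec (s := s) (sub := n0) (by rw [hfn0]; exact hm0)
    rcases hspec0 with ⟨hpre0, hmin0⟩
    rcases pvFirstStartswith_spec N s 0 hN with ⟨_, h2⟩ | ⟨j, hj1, hj2, hj3⟩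
    · exfalso
      apply h2 (PySem.Chars.find s n0).toNat
      rw [List.any_eq_true]
      exact ⟨n0, hn0, List.isPrefixOf_iff_prefix.mpr hpre0⟩
    · have hjle : j ≤ (PySem.Chars.find s n0).toNat := by
        by_contra hlt
        exact hj3 _ (by omega) (List.any_eq_true.mpr ⟨n0, hn0, List.isPrefixOf_iff_prefix.mpr hpre0⟩)
      rcases List.any_eq_true.mp hj2 with ⟨n1, hn1, hpre1⟩
      have hpre1' := List.isPrefixOf_iff_prefix.mp hpre1
      have hf1 : 0 ≤ PySem.Chars.find s n1 := by
        rw [PySem.Chars.find_nonneg_iff]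
        exact (PySem.Chars.isIn_iff_infix n1 s).mp
          ((PySem.Chars.exists_prefix_drop_iff_isIn n1 s).mp ⟨j, hpre1'⟩)
      have hspec1 := PySem.Chars.find_spec (s := s) (sub := n1) hf1
      have hle1 : (PySem.Chars.find s n1).toNat ≤ j := by
        by_contra hlt
        exact hspec1.2 j (by omega) hpre1'
      have hmle : m ≤ PySem.Chars.find s n1 := by
        have := PySem.List.min?_isMin hm (PySem.Chars.find s n1) ?_
        · simpa using this
        · rw [List.mem_filter]
          exact ⟨List.mem_map_of_mem hn1, by simpa using hf1⟩
      rw [hj1, ← hfn0]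
      omega

theorem pv_main (ft : String) (mc : Int) :
    window_history_grade7_py ft mc = window_history_grade7_py_alt ft mc := by
  unfold window_history_grade7_py window_history_grade7_py_alt
  simp only
  set L := PySem.Chars.lower ft.toList with hL
  have key := pvScan_eq_min pvNeedles L (by decide)
  have keyH := pvScan_eq_min ["history".toList] L (by decide)
  set F := (pvNeedles.map (fun n => PySem.Chars.find L n)).filter (fun p => 0 ≤ p) with hFdef
  set H := PySem.Chars.find L "history".toList with hHdef
  have hFH : (["history".toList].map (fun n => PySem.Chars.find L n)).filter (fun p => 0 ≤ p)
      = if 0 ≤ H then [H] else [] := by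
    simp only [List.map_cons, List.map_nil, ← hHdef]
    by_cases h : 0 ≤ H <;> simp [h]
  suffices hanchor :
      ((PySem.List.min? (if F = [] then if 0 ≤ H then [H] else [(0:Int)] else F) (fun p => p)).getD 0)
      = (if (if pvFirstStartswith pvNeedles L 0 < 0 then pvFirstStartswith ["history".toList] L 0
            else pvFirstStartswith pvNeedles L 0) < 0 then 0
         else (if pvFirstStartswith pvNeedles L 0 < 0 then pvFirstStartswith ["history".toList] L 0
            else pvFirstStartswith pvNeedles L 0)) by
    rw [hanchor]
  by_cases hF : F = []
  · have ha0 : pvFirstStartswith pvNeedles L 0 = -1 := key.1 hF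
    rw [hF] at *
    simp only [ha0, if_pos (by norm_num : (-1 : Int) < 0)]
    by_cases hH : 0 ≤ H
    · have hscanH : pvFirstStartswith ["history".toList] L 0 = H := by
        apply keyH.2
        rw [hFH, if_pos hH]
        simp [PySem.List.min?_id_cons]
      rw [hscanH, if_pos hH]
      simp [not_lt.mpr hH, PySem.List.min?_id_cons]
    · have hscanH : pvFirstStartswith ["history".toList] L 0 = -1 := by
        apply keyH.1
        rw [hFH, if_neg hH]
      rw [hscanH, if_neg hH]
      norm_num [PySem.List.min?_id_cons]
  · obtain ⟨m, hm⟩ : ∃ m, PySem.List.min? F (fun p => (p:Int)) = some m := by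
      rcases h : PySem.List.min? F (fun p => (p:Int)) with _ | m
      · exact absurd ((PySem.List.min?_eq_none_iff F _).mp h) hF
      · exact ⟨m, rfl⟩
    have hm0 : (0:Int) ≤ m := by
      have := PySem.List.min?_mem hm
      rw [hFdef, List.mem_filter] at this
      simpa using this.2
    have ha0 : pvFirstStartswith pvNeedles L 0 = m := key.2 m hm
    rw [if_neg hF, ha0, hm]
    simp [not_lt.mpr hm0]

-- ===== VERDICT (by name: the statement is the Claim_ definition above) =====
theorem window_history_grade7_py_spec : Claim_equal_window_history_grade7_py := by
  intro ft mc _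
  unfold Spec_window_history_grade7_py
  exact pv_main ft mc
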